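-- pv_equiv track=rewrite | github.com/nurgull6872/hammingsecdedsimulator | secded.py | encodeHamming
-- ===== SOURCE A (Python) =====
-- def encodeHamming(dataBits): #girilen verime hamming koda dönüştüren fonksiyonum
--     bitsNumber = len(dataBits)
--     pariteBitsNumber = 0
--
--     while (2 ** pariteBitsNumber) < (bitsNumber + pariteBitsNumber + 1):#gerekli olacak parite bits sayımı bulduğum döngü
--         pariteBitsNumber += 1
--     total = bitsNumber + pariteBitsNumber + 1
--
--     hammingCodeList = ['0'] * total #başta data ve parite konumlarımı 0 olarak tuttuğum listeem
--
--     j = 0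
--
--     for i in range(1, total):
--         if not (i & (i - 1)) == 0:  # döngüm binary olarak sayı ve bir önceki sayıyı andler ve sonucuna göre veri bitlerini belirler
--             hammingCodeList[i - 1] = dataBits[j]
--             j += 1
--
--     for i in range(pariteBitsNumber):
--         pos = 2 ** i
--         parity = 0
--         for k in range(1, total):
--             if k & pos:  # parite biti kendisini de kapsar
--                 parity ^= int(hammingCodeList[k - 1])
--         hammingCodeList[pos - 1] = str(parity)
--
--     # secded için ekstra olarak bulunan biti hesapladım
--     bits = hammingCodeList[:-1]
--     numberOfOne = bits.count('1')
--     totalParity = numberOfOne % 2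
--     hammingCodeList[-1] = str(totalParity)
--
--     return ''.join(hammingCodeList)
-- ===== SOURCE B (Python) =====
-- def encodeHamming(dataBits):
--     n = len(dataBits)
--     p = 0
--     while (2 ** p) < (n + p + 1):
--         p += 1
--     total = n + p + 1
--
--     code = ['0'] * total
--     acc = [0] * p  # one XOR accumulator per parity bit
--
--     # single combined pass: place data bits and feed every covering accumulator
--     j = 0
--     for i in range(1, total):
--         if i & (i - 1):
--             c = dataBits[j]
--             j += 1
--             code[i - 1] = c
--             v = int(c)
--             for q in range(p):
--                 if (i >> q) & 1:
--                     acc[q] ^= v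
--
--     # write the accumulated parities into their positions
--     for q in range(p):
--         code[(2 ** q) - 1] = str(acc[q])
--
--     # SECDED overall-parity bit
--     ones = sum(1 for s in code[:-1] if s == '1')
--     code[-1] = str(ones % 2)
--     return ''.join(code)
-- ===== Notes on version B (the rewrite author's own statement) =====
-- stated objective: alternative
-- what changed: B replaces A's per-parity rescans of the whole codeword with a single combined pass that places each data bit and XORs it into an accumulator table (one accumulator per covering parity bit), then writes the accumulators into the parity positions.
import Mathlib
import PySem

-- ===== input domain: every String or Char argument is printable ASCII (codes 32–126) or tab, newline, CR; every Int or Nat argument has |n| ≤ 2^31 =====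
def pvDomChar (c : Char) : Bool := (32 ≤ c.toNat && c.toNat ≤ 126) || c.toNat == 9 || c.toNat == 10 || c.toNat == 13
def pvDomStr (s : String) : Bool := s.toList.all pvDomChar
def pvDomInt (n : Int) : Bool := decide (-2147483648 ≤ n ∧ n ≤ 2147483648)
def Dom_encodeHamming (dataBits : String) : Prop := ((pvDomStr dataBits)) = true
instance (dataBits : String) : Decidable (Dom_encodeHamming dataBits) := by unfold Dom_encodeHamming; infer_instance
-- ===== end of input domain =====

set_option maxRecDepth 8192

-- B replaces A's per-parity rescans of the codeword by one combined pass with an XOR-accumulator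
-- table (objective: alternative decomposition, same asymptotic cost).

-- ===== PORT A =====

-- helper used by the while-loop port's termination proof
theorem pvTwoMulLe : ∀ p : Nat, 2 * p ≤ 2 ^ p
  | 0 => by norm_num
  | 1 => by norm_num
  | (p + 2) => by
      have ih := pvTwoMulLe (p + 1)
      have h2 : 2 ≤ 2 ^ (p + 1) := by
        calc 2 = 2 ^ 1 := rfl
          _ ≤ 2 ^ (p + 1) := Nat.pow_le_pow_right (by norm_num) (by omega)
      calc 2 * (p + 2) = 2 * (p + 1) + 2 := by ring
        _ ≤ 2 ^ (p + 1) + 2 ^ (p + 1) := by omega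
        _ = 2 ^ (p + 2) := by ring

-- the 'while (2 ** p) < (n + p + 1): p += 1' loop, shared verbatim by A and B
def pvParite (b p : Nat) : Nat :=
  if 2 ^ p < b + p + 1 then pvParite b (p + 1) else p
termination_by b + 1 - p
decreasing_by have := pvTwoMulLe p; omega

-- dataBits[j] as a 1-character string; the call sites always index in range, so the default is dead
def pvChr (dataBits : String) (j : Nat) : String :=
  (dataBits.toList[j]?.map (fun c => String.mk [c])).getD "0"

-- int(s); Pre_ admits only digit characters, where ofStr? is some, so the default is dead
def pvDigit (s : String) : Int := (PySem.Int.ofStr? s).getD 0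

def encodeHamming (dataBits : String) : String :=
  let bitsNumber := dataBits.toList.length
  let pariteBitsNumber := pvParite bitsNumber 0
  let total := bitsNumber + pariteBitsNumber + 1
  let hamming0 : List String := List.replicate total "0"
  -- for i in range(1, total): place dataBits[j] at composite positions
  let st := (List.range' 1 (total - 1)).foldl
    (fun (st : List String × Nat) i =>
      if i &&& (i - 1) ≠ 0 then (st.1.set (i - 1) (pvChr dataBits st.2), st.2 + 1) else st)
    (hamming0, 0)
  let hamming1 := st.1
  -- for i in range(pariteBitsNumber): rescan all positions covered by 2**i
  let hamming2 := (List.range pariteBitsNumber).foldl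
    (fun lst i =>
      let pos := 2 ^ i
      let parity := (List.range' 1 (total - 1)).foldl
        (fun par k => if k &&& pos ≠ 0 then PySem.Int.bxor par (pvDigit (lst.getD (k - 1) "0")) else par)
        (0 : Int)
      lst.set (pos - 1) (PySem.Int.toStr parity))
    hamming1
  let bits := hamming2.dropLast
  let numberOfOne := bits.count "1"
  let totalParity := numberOfOne % 2
  let hamming3 := hamming2.set (total - 1) (PySem.Int.toStr (totalParity : Int))
  PySem.Str.join "" hamming3

-- ===== PORT B =====
def encodeHamming_alt (dataBits : String) : String :=
  let n := dataBits.toList.length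
  let p := pvParite n 0
  let total := n + p + 1
  -- single combined pass: place data bits and XOR each into every covering accumulator
  let st := (List.range' 1 (total - 1)).foldl
    (fun (st : List String × List Int × Nat) i =>
      if i &&& (i - 1) ≠ 0 then
        let c := pvChr dataBits st.2.2
        let code := st.1.set (i - 1) c
        let v := pvDigit c
        let acc := (List.range p).foldl
          (fun a q => if (i >>> q) &&& 1 ≠ 0 then a.set q (PySem.Int.bxor (a.getD q 0) v) else a)
          st.2.1
        (code, acc, st.2.2 + 1)
      else st)
    (List.replicate total "0", List.replicate p (0 : Int), 0)
  -- write the accumulated parities into their positions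
  let code := (List.range p).foldl
    (fun l q => l.set (2 ^ q - 1) (PySem.Int.toStr (st.2.1.getD q 0))) st.1
  let ones := (code.dropLast.filter (fun s => s == "1")).length
  let code2 := code.set (total - 1) (PySem.Int.toStr ((ones % 2 : Nat) : Int))
  PySem.Str.join "" code2

-- ===== PRECONDITION & SPEC =====
-- Pre_ excludes exactly the inputs containing a non-digit character: Python's int() raises
-- ValueError there (in A's rescan and in B's combined pass alike), so A returns on no excluded input.
def Pre_encodeHamming (dataBits : String) : Prop :=
  dataBits.toList.all PySem.Str.isdigit = true
instance (dataBits : String) : Decidable (Pre_encodeHamming dataBits) := by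
  unfold Pre_encodeHamming; infer_instance

def pvWitness_encodeHamming : String := "10110"

def Spec_encodeHamming (dataBits : String) (out : String) : Prop := out = encodeHamming_alt dataBits
instance (dataBits : String) (out : String) : Decidable (Spec_encodeHamming dataBits out) := by unfold Spec_encodeHamming; infer_instance

-- ===== CLAIM (what is proved, stated in full; the proofs are below) =====
def Claim_equal_encodeHamming : Prop := ∀ (dataBits : String), Dom_encodeHamming dataBits → Pre_encodeHamming dataBits → Spec_encodeHamming dataBits (encodeHamming dataBits)

-- ===== LEMMAS AND PROOFS =====

-- spec-side abstractions
def pvWrite (L : List String) (ws : List (Nat × String)) : List String :=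
  ws.foldl (fun l w => l.set w.1 w.2) L

def pvComps (total : Nat) : List Nat :=
  (List.range' 1 (total - 1)).filter (fun i => decide (i &&& (i - 1) ≠ 0))

def pvWs1 (dataBits : String) (total : Nat) : List (Nat × String) :=
  (pvComps total).zipIdx.map (fun x => (x.1 - 1, pvChr dataBits x.2))

def pvXor (dataBits : String) (total q : Nat) : Int :=
  (pvComps total).zipIdx.foldl
    (fun par x => if x.1.testBit q then PySem.Int.bxor par (pvDigit (pvChr dataBits x.2)) else par) 0

theorem and_zero_iff (m n : Nat) : m &&& n = 0 ↔ ∀ i, ¬(m.testBit i ∧ n.testBit i) := by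
  constructor
  · intro h i ⟨h1, h2⟩
    have := Nat.testBit_and m n i
    rw [h, Nat.zero_testBit, h1, h2] at this
    simp at this
  · intro h
    apply Nat.eq_of_testBit_eq
    intro i
    rw [Nat.testBit_and, Nat.zero_testBit]
    by_cases h1 : m.testBit i <;> by_cases h2 : n.testBit i <;> simp_all

theorem pow2_of_and_pred (k : Nat) (hk : 0 < k) (h : k &&& (k - 1) = 0) : ∃ j, k = 2 ^ j := by
  induction k using Nat.strong_induction_on with
  | _ k ih =>
    rcases Nat.even_or_odd k with ⟨m, hm⟩ | ⟨m, hm⟩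
    · have hm1 : 0 < m := by omega
      have hsub : m &&& (m - 1) = 0 := by
        rw [and_zero_iff]; intro i ⟨h1, h2⟩
        rw [and_zero_iff] at h
        apply h (i + 1)
        refine ⟨?_, ?_⟩
        · rw [Nat.testBit_add_one]
          have hq : k / 2 = m := by omega
          rw [hq]; exact h1
        · rw [Nat.testBit_add_one]
          have hq : (k - 1) / 2 = m - 1 := by omega
          rw [hq]; exact h2
      obtain ⟨j, hj⟩ := ih m (by omega) hm1 hsub
      exact ⟨j + 1, by rw [pow_succ]; omega⟩
    · rcases Nat.eq_zero_or_pos m with rfl | hm1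
      · exact ⟨0, by omega⟩
      · exfalso
        obtain ⟨i, hi⟩ : ∃ i, m.testBit i := by
          by_contra hc
          push_neg at hc
          have hz : m = 0 :=
            Nat.eq_of_testBit_eq (fun i => by simp [Nat.zero_testBit]; simpa using hc i)
          omega
        rw [and_zero_iff] at h
        apply h (i + 1)
        refine ⟨?_, ?_⟩
        · rw [Nat.testBit_add_one]
          have hq : k / 2 = m := by omega
          rw [hq]; exact hi
        · rw [Nat.testBit_add_one]
          have hq : (k - 1) / 2 = m := by omega
          rw [hq]; exact hi

theorem pow2_and_pred (j : Nat) : 2 ^ j &&& (2 ^ j - 1) = 0 := by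
  rw [and_zero_iff]; intro i ⟨h1, h2⟩
  rw [Nat.testBit_two_pow] at h1
  rw [Nat.testBit_two_pow_sub_one] at h2
  simp at h1 h2
  omega

theorem bit_bridge (n i : Nat) : ((n >>> i) &&& 1 ≠ 0) ↔ n.testBit i := by
  simp [Nat.and_one_is_mod, Nat.testBit, Nat.one_and_eq_mod_two]

theorem and_pow_bridge (n i : Nat) : (n &&& 2 ^ i ≠ 0) ↔ n.testBit i := by
  simp [Nat.and_two_pow]

theorem pvParite_lt (b s q : Nat) (h1 : s ≤ q) (h2 : q < pvParite b s) : 2 ^ q < b + q + 1 := by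
  rw [pvParite] at h2
  split at h2
  · rcases Nat.eq_or_lt_of_le h1 with rfl | hlt
    · assumption
    · exact pvParite_lt b (s + 1) q hlt h2
  · omega
termination_by b + 1 - s
decreasing_by have := pvTwoMulLe s; rename_i h _; omega

-- pvWrite basics
theorem pvWrite_getD_not_mem (L : List String) (ws : List (Nat × String)) (m : Nat)
    (h : m ∉ ws.map Prod.fst) : (pvWrite L ws).getD m "0" = L.getD m "0" := by
  induction ws generalizing L with
  | nil => rfl
  | cons w ws ih =>
    simp only [List.map_cons, List.mem_cons] at h
    push_neg at h
    have step : (L.set w.1 w.2).getD m "0" = L.getD m "0" := by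
      simp [List.getD_eq_getElem?_getD, List.getElem?_set_ne (fun he => h.1 he.symm)]
    calc (pvWrite L (w :: ws)).getD m "0" = (pvWrite (L.set w.1 w.2) ws).getD m "0" := rfl
      _ = (L.set w.1 w.2).getD m "0" := ih _ h.2
      _ = L.getD m "0" := step

theorem pvWrite_getD_mem (L : List String) (ws : List (Nat × String)) (m : Nat) (v : String)
    (hnd : (ws.map Prod.fst).Nodup) (hmem : (m, v) ∈ ws) (hlt : m < L.length) :
    (pvWrite L ws).getD m "0" = v := by
  induction ws generalizing L with
  | nil => simp at hmem
  | cons w ws ih =>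
    simp only [List.map_cons, List.nodup_cons] at hnd
    rcases List.mem_cons.mp hmem with rfl | hm
    · have hnot : m ∉ ws.map Prod.fst := hnd.1
      calc (pvWrite L ((m, v) :: ws)).getD m "0"
          = (pvWrite (L.set m v) ws).getD m "0" := rfl
        _ = (L.set m v).getD m "0" := pvWrite_getD_not_mem _ _ _ hnot
        _ = v := by simp [List.getD_eq_getElem?_getD, List.getElem?_set_self hlt]
    · exact ih (L.set w.1 w.2) hnd.2 hm (by simpa using hlt)

-- comps facts
theorem pvComps_nodup (total : Nat) : (pvComps total).Nodup :=
  (List.nodup_range' ..).filter _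

theorem pvComps_mem (total k : Nat) (h : k ∈ pvComps total) :
    1 ≤ k ∧ k ≤ total - 1 ∧ k &&& (k - 1) ≠ 0 := by
  simp only [pvComps, List.mem_filter, List.mem_range'] at h
  obtain ⟨⟨i, hi, rfl⟩, h2⟩ := h
  refine ⟨by omega, by omega, ?_⟩
  simpa using h2

-- filter-drop: a fold step that is the identity off the filter can be restricted to the filter
theorem foldl_filter_drop {α β : Type} (pb : α → Bool) (f : β → α → β) (l : List α)
    (h : ∀ a x, x ∈ l → pb x = false → f a x = a) (b : β) :
    l.foldl f b = (l.filter pb).foldl f b := by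
  induction l generalizing b with
  | nil => rfl
  | cons x l ih =>
    by_cases hx : pb x
    · simp only [List.filter_cons, hx, if_pos, List.foldl_cons]
      exact ih (fun a y hy => h a y (List.mem_cons_of_mem _ hy)) (f b x)
    · simp only [List.filter_cons, Bool.not_eq_true] at *
      rw [List.foldl_cons, h b x (List.mem_cons_self ..) (by simpa using hx)]
      simp only [hx, Bool.false_eq_true, if_neg, not_false_iff]
      exact ih (fun a y hy => h a y (List.mem_cons_of_mem _ hy)) b

-- phase 1 of A: the data-placement fold is a write sequence
theorem fillA (dataBits : String) (l : List Nat) (L : List String) (j : Nat) :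
    l.foldl
      (fun (st : List String × Nat) i =>
        if i &&& (i - 1) ≠ 0 then (st.1.set (i - 1) (pvChr dataBits st.2), st.2 + 1) else st)
      (L, j)
    = (pvWrite L (((l.filter (fun i => decide (i &&& (i - 1) ≠ 0))).zipIdx j).map
        (fun x => (x.1 - 1, pvChr dataBits x.2))),
       j + (l.filter (fun i => decide (i &&& (i - 1) ≠ 0))).length) := by
  induction l generalizing L j with
  | nil => simp [pvWrite]
  | cons i l ih =>
    by_cases hc : i &&& (i - 1) ≠ 0
    · simp only [List.foldl_cons, if_pos hc, List.filter_cons, decide_eq_true hc, if_pos,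
        List.zipIdx_cons, List.map_cons, List.length_cons]
      rw [ih]
      simp only [Prod.mk.injEq]
      exact ⟨rfl, by omega⟩
    · simp only [List.foldl_cons, if_neg hc, List.filter_cons]
      have : decide (i &&& (i - 1) ≠ 0) = false := by simpa using hc
      rw [this]
      simp only [Bool.false_eq_true, if_neg, not_false_iff]
      exact ih L j

-- inner accumulator update of B, pointwise
theorem innerB (P : Nat) (i : Nat) (v : Int) :
    ∀ (r : Nat) (a : List Int), a.length = P → r ≤ P →
      (((List.range r).foldl
          (fun a q => if (i >>> q) &&& 1 ≠ 0 then a.set q (PySem.Int.bxor (a.getD q 0) v) else a)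
          a).length = P ∧
       ∀ q, ((List.range r).foldl
          (fun a q => if (i >>> q) &&& 1 ≠ 0 then a.set q (PySem.Int.bxor (a.getD q 0) v) else a)
          a).getD q 0
          = if q < r ∧ i.testBit q then PySem.Int.bxor (a.getD q 0) v else a.getD q 0) := by
  intro r
  induction r with
  | zero => intro a ha _; exact ⟨ha, fun q => by simp⟩
  | succ r ih =>
    intro a ha hr
    obtain ⟨hlen, hget⟩ := ih a ha (by omega)
    rw [List.range_succ, List.foldl_append, List.foldl_cons, List.foldl_nil]
    set M := (List.range r).foldl
      (fun a q => if (i >>> q) &&& 1 ≠ 0 then a.set q (PySem.Int.bxor (a.getD q 0) v) else a) a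
    by_cases hb : (i >>> r) &&& 1 ≠ 0
    · have hbit : i.testBit r := (bit_bridge i r).mp hb
      rw [if_pos hb]
      refine ⟨by simpa using hlen, fun q => ?_⟩
      by_cases hq : q = r
      · subst hq
        rw [List.getD_eq_getElem?_getD, List.getElem?_set_self (by omega),
          Option.getD_some, hget q]
        simp [hbit, lt_irrefl]
      · rw [List.getD_eq_getElem?_getD, List.getElem?_set_ne (fun he => hq he.symm),
          ← List.getD_eq_getElem?_getD, hget q]
        have hiff : (q < r ∧ i.testBit q) ↔ (q < r + 1 ∧ i.testBit q) := by
          constructor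
          · intro h; exact ⟨by omega, h.2⟩
          · intro h; exact ⟨by omega, h.2⟩
        simp only [hiff]
    · have hbit : ¬ i.testBit r := fun hh => hb ((bit_bridge i r).mpr hh)
      rw [if_neg hb]
      refine ⟨hlen, fun q => ?_⟩
      rw [hget q]
      by_cases hq : q = r
      · subst hq; simp [hbit, lt_irrefl]
      · have hiff : (q < r ∧ i.testBit q) ↔ (q < r + 1 ∧ i.testBit q) := by
          constructor
          · intro h; exact ⟨by omega, h.2⟩
          · intro h; exact ⟨by omega, h.2⟩
        simp only [hiff]

-- acc over the zipped pairs, pointwise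
theorem accB (dataBits : String) (P : Nat) (q : Nat) (hq : q < P) :
    ∀ (ws : List (Nat × Nat)) (a : List Int), a.length = P →
      ((ws.foldl (fun (a : List Int) x =>
          (List.range P).foldl
            (fun a r => if (x.1 >>> r) &&& 1 ≠ 0
              then a.set r (PySem.Int.bxor (a.getD r 0) (pvDigit (pvChr dataBits x.2))) else a) a)
          a).length = P ∧
       (ws.foldl (fun (a : List Int) x =>
          (List.range P).foldl
            (fun a r => if (x.1 >>> r) &&& 1 ≠ 0
              then a.set r (PySem.Int.bxor (a.getD r 0) (pvDigit (pvChr dataBits x.2))) else a) a)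
          a).getD q 0
        = ws.foldl (fun par x => if x.1.testBit q
            then PySem.Int.bxor par (pvDigit (pvChr dataBits x.2)) else par) (a.getD q 0)) := by
  intro ws
  induction ws with
  | nil => intro a ha; exact ⟨ha, rfl⟩
  | cons x ws ih =>
    intro a ha
    obtain ⟨hlen, hget⟩ := innerB P x.1 (pvDigit (pvChr dataBits x.2)) P a ha (le_refl P)
    obtain ⟨hlen2, hget2⟩ := ih _ hlen
    refine ⟨hlen2, ?_⟩
    rw [List.foldl_cons, List.foldl_cons, hget2, hget q]
    have : (q < P ∧ x.1.testBit q) ↔ x.1.testBit q := by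
      constructor
      · exact fun h => h.2
      · exact fun h => ⟨hq, h⟩
    split_ifs with h1 h2 h2 <;> first | rfl | (exfalso; tauto)

-- B's combined pass, decomposed: code component, accumulator component, counter
theorem fillB (dataBits : String) (P : Nat) (l : List Nat) (L : List String)
    (A : List Int) (j : Nat) :
    l.foldl
      (fun (st : List String × List Int × Nat) i =>
        if i &&& (i - 1) ≠ 0 then
          (st.1.set (i - 1) (pvChr dataBits st.2.2),
           (List.range P).foldl
             (fun a q => if (i >>> q) &&& 1 ≠ 0
               then a.set q (PySem.Int.bxor (a.getD q 0) (pvDigit (pvChr dataBits st.2.2))) else a)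
             st.2.1,
           st.2.2 + 1)
        else st)
      (L, A, j)
    = (pvWrite L (((l.filter (fun i => decide (i &&& (i - 1) ≠ 0))).zipIdx j).map
        (fun x => (x.1 - 1, pvChr dataBits x.2))),
       ((l.filter (fun i => decide (i &&& (i - 1) ≠ 0))).zipIdx j).foldl
         (fun (a : List Int) x =>
           (List.range P).foldl
             (fun a r => if (x.1 >>> r) &&& 1 ≠ 0
               then a.set r (PySem.Int.bxor (a.getD r 0) (pvDigit (pvChr dataBits x.2))) else a) a)
         A,
       j + (l.filter (fun i => decide (i &&& (i - 1) ≠ 0))).length) := by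
  induction l generalizing L A j with
  | nil => simp [pvWrite]
  | cons i l ih =>
    by_cases hc : i &&& (i - 1) ≠ 0
    · simp only [List.foldl_cons, if_pos hc, List.filter_cons, decide_eq_true hc, if_pos,
        List.zipIdx_cons, List.map_cons, List.length_cons]
      rw [ih]
      exact Prod.ext rfl (Prod.ext rfl (by dsimp only; omega))
    · simp only [List.foldl_cons, if_neg hc, List.filter_cons]
      have hd : decide (i &&& (i - 1) ≠ 0) = false := by simpa using hc
      rw [hd]
      simp only [Bool.false_eq_true, if_neg, not_false_iff]
      exact ih L A j

theorem pvDigit_zero : pvDigit "0" = 0 := by decide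

theorem pow_inj (q m : Nat) (h : 2 ^ q - 1 = 2 ^ m - 1) : q = m := by
  have h1 : (0:Nat) < 2 ^ q := Nat.two_pow_pos q
  have h2 : (0:Nat) < 2 ^ m := Nat.two_pow_pos m
  have : (2:Nat) ^ q = 2 ^ m := by omega
  exact Nat.pow_right_injective (le_refl 2) this

-- the parity-write sequence of length m (positions 2^q - 1, q < m)
def pvWs2 (dataBits : String) (total m : Nat) : List (Nat × String) :=
  (List.range m).map (fun q => (2 ^ q - 1, PySem.Int.toStr (pvXor dataBits total q)))

theorem ws1_fst (dataBits : String) (total : Nat) :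
    (pvWs1 dataBits total).map Prod.fst = (pvComps total).map (fun k => k - 1) := by
  unfold pvWs1
  rw [List.map_map]
  have : ((pvComps total).zipIdx.map (Prod.fst ∘ fun x => (x.1 - 1, pvChr dataBits x.2)))
      = ((pvComps total).zipIdx.map Prod.fst).map (fun k => k - 1) := by
    rw [List.map_map]; rfl
  rw [this, List.zipIdx_map_fst]

theorem ws1_fst_nodup (dataBits : String) (total : Nat) :
    ((pvWs1 dataBits total).map Prod.fst).Nodup := by
  rw [ws1_fst]
  apply List.Nodup.map_on
  · intro x hx y hy hxy
    have h1 := pvComps_mem total x hx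
    have h2 := pvComps_mem total y hy
    omega
  · exact pvComps_nodup total

-- L1 at a composite position holds the corresponding data character
theorem L1_comp (dataBits : String) (total : Nat) (k r : Nat)
    (h : (k, r) ∈ (pvComps total).zipIdx) :
    (pvWrite (List.replicate total "0") (pvWs1 dataBits total)).getD (k - 1) "0"
      = pvChr dataBits r := by
  have hk : k ∈ pvComps total := by
    have := List.mem_map_of_mem (f := Prod.fst) h
    rwa [List.zipIdx_map_fst] at this
  have hkb := pvComps_mem total k hk
  apply pvWrite_getD_mem
  · exact ws1_fst_nodup dataBits total
  · exact List.mem_map_of_mem (f := fun x => (x.1 - 1, pvChr dataBits x.2)) h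
  · rw [List.length_replicate]; omega

-- L1 at a parity position (2^j - 1 for any j in range) is still "0"
theorem L1_pow (dataBits : String) (total j : Nat) (hj : 2 ^ j ≤ total - 1) :
    (pvWrite (List.replicate total "0") (pvWs1 dataBits total)).getD (2 ^ j - 1) "0" = "0" := by
  have hpos : (0:Nat) < 2 ^ j := Nat.two_pow_pos j
  have hnm : 2 ^ j - 1 ∉ (pvWs1 dataBits total).map Prod.fst := by
    rw [ws1_fst]
    intro hmem
    obtain ⟨k, hk, he⟩ := List.mem_map.mp hmem
    have hkb := pvComps_mem total k hk
    have : k = 2 ^ j := by omega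
    subst this
    exact hkb.2.2 (pow2_and_pred j)
  rw [pvWrite_getD_not_mem _ _ _ hnm]
  rw [List.getD_eq_getElem?_getD, List.getElem?_replicate]
  have : 2 ^ j - 1 < total := by omega
  simp [this]

-- the evolving codeword at position 2^m - 1 is still "0" before the m-th parity write
theorem cur_pow (dataBits : String) (total m : Nat) (hm : 2 ^ m ≤ total - 1) :
    (pvWrite (pvWrite (List.replicate total "0") (pvWs1 dataBits total))
        (pvWs2 dataBits total m)).getD (2 ^ m - 1) "0" = "0" := by
  have hnm : 2 ^ m - 1 ∉ (pvWs2 dataBits total m).map Prod.fst := by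
    unfold pvWs2
    rw [List.map_map]
    intro hmem
    obtain ⟨q, hq, he⟩ := List.mem_map.mp hmem
    have hq' : q < m := List.mem_range.mp hq
    have : q = m := pow_inj q m he
    omega
  rw [pvWrite_getD_not_mem _ _ _ hnm]
  exact L1_pow dataBits total m hm

-- a non-data position covered by parity m must be position 2^m itself
theorem noncomp_bit (total m k : Nat) (hk1 : 1 ≤ k) (hk0 : k &&& (k - 1) = 0)
    (hbit : k.testBit m) : k = 2 ^ m := by
  obtain ⟨j, rfl⟩ := pow2_of_and_pred k hk1 hk0
  rw [Nat.testBit_two_pow] at hbit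
  simp at hbit
  subst hbit
  rfl

-- A's rescan for parity m over the evolving codeword computes pvXor m
theorem parityA (dataBits : String) (total m : Nat) (hm : 2 ^ m ≤ total - 1) :
    (List.range' 1 (total - 1)).foldl
      (fun par k => if k &&& 2 ^ m ≠ 0
        then PySem.Int.bxor par (pvDigit
          ((pvWrite (pvWrite (List.replicate total "0") (pvWs1 dataBits total))
            (pvWs2 dataBits total m)).getD (k - 1) "0"))
        else par) (0 : Int)
    = pvXor dataBits total m := by
  set cur := pvWrite (pvWrite (List.replicate total "0") (pvWs1 dataBits total))
    (pvWs2 dataBits total m) with hcur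
  rw [foldl_filter_drop (fun i => decide (i &&& (i - 1) ≠ 0)) _ _ ?drop]
  case drop =>
    intro par k hk hpb
    have hk1 : 1 ≤ k := by
      rcases List.mem_range'.mp hk with ⟨i, hi, rfl⟩; omega
    have hk0 : k &&& (k - 1) = 0 := by simpa using hpb
    by_cases hb : k &&& 2 ^ m ≠ 0
    · have hbit := (and_pow_bridge k m).mp hb
      have hke : k = 2 ^ m := noncomp_bit total m k hk1 hk0 hbit
      rw [if_pos hb, hke, cur_pow dataBits total m hm, pvDigit_zero]
      simp
    · rw [if_neg hb]
  show (pvComps total).foldl _ _ = _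
  unfold pvXor
  conv_lhs => rw [show pvComps total = ((pvComps total).zipIdx.map Prod.fst) from
    (List.zipIdx_map_fst 0 _).symm]
  rw [List.foldl_map]
  apply PySem.List.foldl_congr_mem
  intro par x hx
  have hchr := L1_comp dataBits total x.1 x.2 hx
  have hx1 : x.1 ∈ pvComps total := by
    have := List.mem_map_of_mem (f := Prod.fst) hx
    rwa [List.zipIdx_map_fst] at this
  have hxb := pvComps_mem total x.1 hx1
  have hnm : x.1 - 1 ∉ (pvWs2 dataBits total m).map Prod.fst := by
    unfold pvWs2
    rw [List.map_map]
    intro hmem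
    obtain ⟨q, hq, he⟩ := List.mem_map.mp hmem
    simp only [Function.comp] at he
    have hpos : (0:Nat) < 2 ^ q := Nat.two_pow_pos q
    have : x.1 = 2 ^ q := by omega
    rw [this] at hxb
    exact hxb.2.2 (pow2_and_pred q)
  have hcv : cur.getD (x.1 - 1) "0" = pvChr dataBits x.2 := by
    rw [hcur, pvWrite_getD_not_mem _ _ _ hnm, hchr]
  rw [hcv]
  by_cases hb : x.1.testBit m
  · rw [if_pos ((and_pow_bridge x.1 m).mpr hb), if_pos hb]
  · rw [if_neg (fun hh => hb ((and_pow_bridge x.1 m).mp hh)), if_neg hb]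

-- A's sequential parity passes are a write sequence of the pvXor values
theorem phase2A (dataBits : String) (b P : Nat) (hP : P = pvParite b 0)
    (htot : ∀ q < P, 2 ^ q ≤ b + P) :
    ∀ m ≤ P,
    (List.range m).foldl
      (fun lst i =>
        lst.set (2 ^ i - 1) (PySem.Int.toStr
          ((List.range' 1 (b + P + 1 - 1)).foldl
            (fun par k => if k &&& 2 ^ i ≠ 0
              then PySem.Int.bxor par (pvDigit (lst.getD (k - 1) "0")) else par) (0 : Int))))
      (pvWrite (List.replicate (b + P + 1) "0") (pvWs1 dataBits (b + P + 1)))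
    = pvWrite (pvWrite (List.replicate (b + P + 1) "0") (pvWs1 dataBits (b + P + 1)))
        (pvWs2 dataBits (b + P + 1) m) := by
  intro m
  induction m with
  | zero => intro _; simp [pvWs2, pvWrite]
  | succ m ih =>
    intro hm
    rw [List.range_succ, List.foldl_append, List.foldl_cons, List.foldl_nil, ih (by omega)]
    have hm2 : 2 ^ m ≤ (b + P + 1) - 1 := by
      have := htot m (by omega); omega
    rw [parityA dataBits (b + P + 1) m hm2]
    show _ = pvWrite _ (pvWs2 dataBits (b + P + 1) (m + 1))
    unfold pvWs2
    rw [List.range_succ, List.map_append]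
    unfold pvWrite
    rw [List.foldl_append]
    rfl

-- ===== VERDICT (by name: the statement is the Claim_ definition above) =====
theorem encodeHamming_spec : Claim_equal_encodeHamming := by
  intro dataBits _ _
  unfold Spec_encodeHamming
  simp only [encodeHamming, encodeHamming_alt]
  set b := dataBits.toList.length with hb
  set P := pvParite b 0 with hP
  have htot : ∀ q < P, 2 ^ q ≤ b + P := by
    intro q hq
    have := pvParite_lt b 0 q (Nat.zero_le q) hq
    omega
  rw [fillA dataBits (List.range' 1 (b + P + 1 - 1)) (List.replicate (b + P + 1) "0") 0]
  rw [fillB dataBits P (List.range' 1 (b + P + 1 - 1)) (List.replicate (b + P + 1) "0")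
    (List.replicate P (0 : Int)) 0]
  dsimp only
  have heq : (((List.range' 1 (b + P + 1 - 1)).filter
      (fun i => decide (i &&& (i - 1) ≠ 0))).zipIdx 0).map
      (fun x => (x.1 - 1, pvChr dataBits x.2)) = pvWs1 dataBits (b + P + 1) := rfl
  rw [heq]
  have hA := phase2A dataBits b P hP htot P (le_refl P)
  rw [hA]
  -- B's parity writes, with the accumulator values identified as the pvXor values
  have hacc := accB dataBits P
  have hBwrites :
      List.foldl
        (fun (l : List String) q =>
          l.set (2 ^ q - 1) (PySem.Int.toStr
            ((List.foldl
              (fun (a : List Int) x =>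
                List.foldl
                  (fun a r => if (x.1 >>> r) &&& 1 ≠ 0
                    then a.set r (PySem.Int.bxor (a.getD r 0) (pvDigit (pvChr dataBits x.2)))
                    else a) a (List.range P))
              (List.replicate P (0 : Int))
              (((List.range' 1 (b + P + 1 - 1)).filter
                (fun i => decide (i &&& (i - 1) ≠ 0))).zipIdx 0)).getD q 0)))
        (pvWrite (List.replicate (b + P + 1) "0") (pvWs1 dataBits (b + P + 1)))
        (List.range P)
      = pvWrite (pvWrite (List.replicate (b + P + 1) "0") (pvWs1 dataBits (b + P + 1)))
          (pvWs2 dataBits (b + P + 1) P) := by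
    have hmap : ∀ q ∈ List.range P,
        ((fun q => (2 ^ q - 1, PySem.Int.toStr
          ((List.foldl
              (fun (a : List Int) x =>
                List.foldl
                  (fun a r => if (x.1 >>> r) &&& 1 ≠ 0
                    then a.set r (PySem.Int.bxor (a.getD r 0) (pvDigit (pvChr dataBits x.2)))
                    else a) a (List.range P))
              (List.replicate P (0 : Int))
              (((List.range' 1 (b + P + 1 - 1)).filter
                (fun i => decide (i &&& (i - 1) ≠ 0))).zipIdx 0)).getD q 0))) q)
        = ((fun q => (2 ^ q - 1, PySem.Int.toStr (pvXor dataBits (b + P + 1) q))) q) := by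
      intro q hq
      have hqP : q < P := List.mem_range.mp hq
      obtain ⟨_, hget⟩ := hacc q hqP
        (((List.range' 1 (b + P + 1 - 1)).filter
          (fun i => decide (i &&& (i - 1) ≠ 0))).zipIdx 0)
        (List.replicate P (0 : Int)) (List.length_replicate ..)
      dsimp only
      rw [hget]
      have h0 : (List.replicate P (0 : Int)).getD q 0 = 0 := by
        rw [List.getD_eq_getElem?_getD, List.getElem?_replicate]
        simp [hqP]
      rw [h0]
      rfl
    calc List.foldl _ (pvWrite (List.replicate (b + P + 1) "0") (pvWs1 dataBits (b + P + 1)))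
          (List.range P)
        = List.foldl (fun (l : List String) (w : Nat × String) => l.set w.1 w.2)
            (pvWrite (List.replicate (b + P + 1) "0") (pvWs1 dataBits (b + P + 1)))
            ((List.range P).map (fun q => (2 ^ q - 1, PySem.Int.toStr
              ((List.foldl
                (fun (a : List Int) x =>
                  List.foldl
                    (fun a r => if (x.1 >>> r) &&& 1 ≠ 0
                      then a.set r (PySem.Int.bxor (a.getD r 0) (pvDigit (pvChr dataBits x.2)))
                      else a) a (List.range P))
                (List.replicate P (0 : Int))
                (((List.range' 1 (b + P + 1 - 1)).filter
                  (fun i => decide (i &&& (i - 1) ≠ 0))).zipIdx 0)).getD q 0)))) := by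
          rw [List.foldl_map]
      _ = pvWrite (pvWrite (List.replicate (b + P + 1) "0") (pvWs1 dataBits (b + P + 1)))
            (pvWs2 dataBits (b + P + 1) P) := by
          rw [List.map_congr_left hmap]; rfl
  rw [hBwrites]
  rw [List.count_eq_length_filter]
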